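-- pv_equiv track=rewrite | github.com/seahrh/coding-interview | src/codi/dynamicprogramming/lc1_minimum_number_of_work_sessions_to_finish_the_tasks.py | minSessions
-- ===== SOURCE A (Python) =====
-- from typing import List
--
-- def minSessions(tasks: List[int], sessionTime: int) -> int:
--     n = len(tasks)
--     pow2n = 1 << n
--     # Base case 1: n sessions required in worst case scenario
--     dp = [(n, 0) for _ in range(pow2n)]
--     # Base case 2: 1 session required even if no task selected
--     dp[0] = (1, 0)
--     for s in range(1, pow2n):
--         for i in range(n):
--             # i-th task is present in subset
--             if s & (1 << i):
--                 # get prev computation for subset less i-th task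
--                 # caret symbol is bitwise XOR operator
--                 c, w = dp[s ^ (1 << i)]
--                 if w + tasks[i] > sessionTime:  # new session for i-th person
--                     c += 1
--                     w = tasks[i]
--                 else:
--                     w += tasks[i]
--                 dp[s] = min(dp[s], (c, w))
--     return dp[pow2n - 1][0]  # 2^n-1: all tasks selected
-- ===== SOURCE B (Python) =====
-- def minSessions(tasks, sessionTime):
--     n = len(tasks)
--     pow2n = 1 << n
--     memo = [None] * pow2n
--
--     def f(mask):
--         if memo[mask] is not None:
--             return memo[mask]
--         if mask == 0:
--             res = (1, 0)
--         else:
--             res = (n, 0)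
--             for i in range(n):
--                 if mask & (1 << i):
--                     c, w = f(mask ^ (1 << i))
--                     if w + tasks[i] > sessionTime:
--                         c += 1
--                         w = tasks[i]
--                     else:
--                         w += tasks[i]
--                     res = min(res, (c, w))
--         memo[mask] = res
--         return res
--
--     return f(pow2n - 1)[0]
-- ===== Notes on version B (the rewrite author's own statement) =====
-- stated objective: alternative
-- what changed: Replaces the bottom-up array DP over all subset bitmasks with a top-down memoized recursion f(mask) (memo list of size 2^n), keeping the identical recurrence and tie-breaking.
import Mathlib
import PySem

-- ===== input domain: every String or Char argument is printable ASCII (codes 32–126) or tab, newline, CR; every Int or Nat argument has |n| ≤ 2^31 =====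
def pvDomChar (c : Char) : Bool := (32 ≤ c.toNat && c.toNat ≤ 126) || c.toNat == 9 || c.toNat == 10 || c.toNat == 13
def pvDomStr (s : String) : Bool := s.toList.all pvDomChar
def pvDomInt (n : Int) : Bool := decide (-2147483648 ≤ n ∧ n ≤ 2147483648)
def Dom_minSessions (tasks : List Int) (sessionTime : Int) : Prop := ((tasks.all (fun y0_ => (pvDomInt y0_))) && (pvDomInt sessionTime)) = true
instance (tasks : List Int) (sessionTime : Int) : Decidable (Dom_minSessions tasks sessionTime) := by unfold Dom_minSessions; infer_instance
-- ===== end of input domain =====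

-- B replaces A's bottom-up array DP over subset bitmasks by a top-down memoized
-- recursion with the identical recurrence and tie-breaking (objective: alternative
-- decomposition, same asymptotic cost); return values agree on all inputs.

-- Python's two-argument `min` on int pairs: lexicographic, first argument on ties.
def tmin (a b : Int × Int) : Int × Int :=
  if b.1 < a.1 ∨ (b.1 = a.1 ∧ b.2 < a.2) then b else a

-- Termination lemma cited by the B port: clearing a set bit decreases the mask.
theorem pv_xor_lt {mask i : Nat} (h : mask &&& (1 <<< i) ≠ 0) : mask ^^^ (1 <<< i) < mask := by
  have h2 : (1 : Nat) <<< i = 2 ^ i := by simp [Nat.shiftLeft_eq]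
  rw [h2] at h ⊢
  have hb : mask.testBit i = true := by
    rcases Bool.eq_false_or_eq_true (mask.testBit i) with ht | hf
    · exact ht
    · exfalso; apply h; rw [Nat.and_two_pow, hf]; simp
  apply Nat.lt_of_testBit i
  · simp [Nat.testBit_xor, hb, Nat.testBit_two_pow_self]
  · exact hb
  · intro j hj
    simp [Nat.testBit_xor, Nat.testBit_two_pow_of_ne (Nat.ne_of_lt hj)]

-- ===== PORT A =====
-- Bottom-up DP: dp over all 2^n subsets, filled for s = 1 .. 2^n-1.
def minSessions (tasks : List Int) (sessionTime : Int) : Int :=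
  let n := tasks.length
  let pow2n := 1 <<< n
  let dp0 := (List.replicate pow2n ((n : Int), (0 : Int))).set 0 (1, 0)
  let dp := (List.range' 1 (pow2n - 1)).foldl
      (fun dp s =>
        (List.range n).foldl
          (fun dp i =>
            if s &&& (1 <<< i) ≠ 0 then
              let cw := dp.getD (s ^^^ (1 <<< i)) (0, 0)
              let t := tasks.getD i 0
              let cand := if cw.2 + t > sessionTime then (cw.1 + 1, t) else (cw.1, cw.2 + t)
              dp.set s (tmin (dp.getD s (0, 0)) cand)
            else dp)
          dp)
      dp0
  (dp.getD (pow2n - 1) (0, 0)).1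

-- ===== PORT B =====
-- Top-down memoized recursion f(mask); the Python memo list becomes a threaded array.
def goB (tasks : List Int) (sessionTime : Int) (n : Nat) (mask : Nat)
    (memo : Array (Option (Int × Int))) : (Int × Int) × Array (Option (Int × Int)) :=
  match memo.getD mask none with
  | some v => (v, memo)
  | none =>
    if mask = 0 then
      (((1 : Int), (0 : Int)), memo.setIfInBounds mask (some ((1 : Int), (0 : Int))))
    else
      let p := (List.range n).foldl
          (fun (p : (Int × Int) × Array (Option (Int × Int))) i =>
            if h : mask &&& (1 <<< i) ≠ 0 then
              let r := goB tasks sessionTime n (mask ^^^ (1 <<< i)) p.2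
              let t := tasks.getD i 0
              let cand := if r.1.2 + t > sessionTime then (r.1.1 + 1, t) else (r.1.1, r.1.2 + t)
              (tmin p.1 cand, r.2)
            else p)
          (((n : Int), (0 : Int)), memo)
      (p.1, p.2.setIfInBounds mask (some p.1))
termination_by mask
decreasing_by exact pv_xor_lt h

def minSessions_alt (tasks : List Int) (sessionTime : Int) : Int :=
  let n := tasks.length
  let pow2n := 1 <<< n
  (goB tasks sessionTime n (pow2n - 1) (Array.replicate pow2n none)).1.1

-- ===== PRECONDITION & SPEC =====
def Spec_minSessions (tasks : List Int) (sessionTime : Int) (out : Int) : Prop := out = minSessions_alt tasks sessionTime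
instance (tasks : List Int) (sessionTime : Int) (out : Int) : Decidable (Spec_minSessions tasks sessionTime out) := by unfold Spec_minSessions; infer_instance

-- ===== CLAIM (what is proved, stated in full; the proofs are below) =====
def Claim_equal_minSessions : Prop := ∀ (tasks : List Int) (sessionTime : Int), Dom_minSessions tasks sessionTime → Spec_minSessions tasks sessionTime (minSessions tasks sessionTime)

-- ===== LEMMAS AND PROOFS =====

-- The common recurrence, as a pure well-founded recursion over masks.
def Fspec (tasks : List Int) (st : Int) (n : Nat) (mask : Nat) : Int × Int :=
  if mask = 0 then ((1 : Int), (0 : Int))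
  else
    (List.range n).foldl
      (fun acc i =>
        if h : mask &&& (1 <<< i) ≠ 0 then
          let cw := Fspec tasks st n (mask ^^^ (1 <<< i))
          let t := tasks.getD i 0
          let cand := if cw.2 + t > st then (cw.1 + 1, t) else (cw.1, cw.2 + t)
          tmin acc cand
        else acc)
      ((n : Int), (0 : Int))
termination_by mask
decreasing_by exact pv_xor_lt h

-- Named copies of the step functions appearing in the ports / in Fspec.
def innerA (tasks : List Int) (st : Int) (s : Nat) (dp : List (Int × Int)) (i : Nat) : List (Int × Int) :=
  if s &&& (1 <<< i) ≠ 0 then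
    let cw := dp.getD (s ^^^ (1 <<< i)) (0, 0)
    let t := tasks.getD i 0
    let cand := if cw.2 + t > st then (cw.1 + 1, t) else (cw.1, cw.2 + t)
    dp.set s (tmin (dp.getD s (0, 0)) cand)
  else dp

def pstep (tasks : List Int) (st : Int) (dp : List (Int × Int)) (s : Nat) (acc : Int × Int) (i : Nat) : Int × Int :=
  if s &&& (1 <<< i) ≠ 0 then
    let cw := dp.getD (s ^^^ (1 <<< i)) (0, 0)
    let t := tasks.getD i 0
    let cand := if cw.2 + t > st then (cw.1 + 1, t) else (cw.1, cw.2 + t)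
    tmin acc cand
  else acc

def fstep (tasks : List Int) (st : Int) (n : Nat) (mask : Nat) (acc : Int × Int) (i : Nat) : Int × Int :=
  if h : mask &&& (1 <<< i) ≠ 0 then
    let cw := Fspec tasks st n (mask ^^^ (1 <<< i))
    let t := tasks.getD i 0
    let cand := if cw.2 + t > st then (cw.1 + 1, t) else (cw.1, cw.2 + t)
    tmin acc cand
  else acc

def bstep (tasks : List Int) (st : Int) (n : Nat) (mask : Nat)
    (p : (Int × Int) × Array (Option (Int × Int))) (i : Nat) : (Int × Int) × Array (Option (Int × Int)) :=
  if h : mask &&& (1 <<< i) ≠ 0 then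
    let r := goB tasks st n (mask ^^^ (1 <<< i)) p.2
    let t := tasks.getD i 0
    let cand := if r.1.2 + t > st then (r.1.1 + 1, t) else (r.1.1, r.1.2 + t)
    (tmin p.1 cand, r.2)
  else p

def dpInit (tasks : List Int) (n : Nat) : List (Int × Int) :=
  (List.replicate (2 ^ n) ((n : Int), (0 : Int))).set 0 (1, 0)

def MemoInv (tasks : List Int) (st : Int) (n : Nat) (memo : Array (Option (Int × Int))) : Prop :=
  ∀ k v, memo.getD k none = some v → v = Fspec tasks st n k

theorem pv_xor_ne {mask i : Nat} (h : mask &&& (1 <<< i) ≠ 0) : mask ^^^ (1 <<< i) ≠ mask :=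
  Nat.ne_of_lt (pv_xor_lt h)

theorem Fspec_eq (tasks : List Int) (st : Int) (n mask : Nat) :
    Fspec tasks st n mask =
      if mask = 0 then ((1 : Int), (0 : Int))
      else (List.range n).foldl (fstep tasks st n mask) ((n : Int), (0 : Int)) := by
  rw [Fspec]; rfl

theorem goB_eq (tasks : List Int) (st : Int) (n mask : Nat) (memo : Array (Option (Int × Int))) :
    goB tasks st n mask memo =
      match memo.getD mask none with
      | some v => (v, memo)
      | none =>
        if mask = 0 then
          (((1 : Int), (0 : Int)), memo.setIfInBounds mask (some ((1 : Int), (0 : Int))))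
        else
          let p := (List.range n).foldl (bstep tasks st n mask) (((n : Int), (0 : Int)), memo)
          (p.1, p.2.setIfInBounds mask (some p.1)) := by
  rw [goB]; rfl

theorem minSessions_eq (tasks : List Int) (st : Int) :
    minSessions tasks st =
      (((List.range' 1 (2 ^ tasks.length - 1)).foldl
          (fun dp s => (List.range tasks.length).foldl (innerA tasks st s) dp)
          (dpInit tasks tasks.length)).getD (2 ^ tasks.length - 1) (0, 0)).1 := by
  simp only [minSessions, dpInit]
  rw [Nat.one_shiftLeft]
  rfl

theorem minSessions_alt_eq (tasks : List Int) (st : Int) :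
    minSessions_alt tasks st =
      (goB tasks st tasks.length (2 ^ tasks.length - 1)
        (Array.replicate (2 ^ tasks.length) none)).1.1 := by
  simp only [minSessions_alt]
  rw [Nat.one_shiftLeft]

theorem set_getD_self {l : List (Int × Int)} {i : Nat} (h : i < l.length) (d : Int × Int) :
    l.set i (l.getD i d) = l := by
  rw [List.getD_eq_getElem?_getD, List.getElem?_eq_getElem h, Option.getD_some]
  exact List.set_getElem_self h

theorem getD_set_self {l : List (Int × Int)} {i : Nat} (h : i < l.length) (v d : Int × Int) :
    (l.set i v).getD i d = v := by
  rw [List.getD_eq_getElem?_getD, List.getElem?_set_self']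
  simp [h]

theorem getD_set_ne {l : List (Int × Int)} {i j : Nat} (h : i ≠ j) (v d : Int × Int) :
    (l.set i v).getD j d = l.getD j d := by
  rw [List.getD_eq_getElem?_getD, List.getElem?_set_ne h, ← List.getD_eq_getElem?_getD]

theorem pstep_set (tasks : List Int) (st : Int) (dp : List (Int × Int)) (s : Nat) (v : Int × Int) :
    pstep tasks st (dp.set s v) s = pstep tasks st dp s := by
  funext acc i
  unfold pstep
  by_cases hb : s &&& (1 <<< i) ≠ 0
  · simp only [hb, getD_set_ne (Ne.symm (pv_xor_ne hb))]
  · simp [hb]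

theorem inner_fold (tasks : List Int) (st : Int) (s : Nat) :
    ∀ (l : List Nat) (dp : List (Int × Int)), s < dp.length →
      l.foldl (innerA tasks st s) dp =
        dp.set s (l.foldl (pstep tasks st dp s) (dp.getD s (0, 0))) := by
  intro l
  induction l with
  | nil => intro dp hs; exact (set_getD_self hs (0, 0)).symm
  | cons i l ih =>
    intro dp hs
    by_cases hb : s &&& (1 <<< i) ≠ 0
    · have hstep : innerA tasks st s dp i =
          dp.set s (pstep tasks st dp s (dp.getD s (0, 0)) i) := by
        unfold innerA pstep; simp [hb]
      rw [List.foldl_cons, hstep, ih _ (by simpa using hs)]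
      rw [List.set_set, getD_set_self hs, pstep_set]
      simp
    · have hstep : innerA tasks st s dp i = dp := by unfold innerA; simp [hb]
      have hstep' : pstep tasks st dp s (dp.getD s (0, 0)) i = dp.getD s (0, 0) := by
        unfold pstep; simp [hb]
      rw [List.foldl_cons, hstep, ih _ hs, List.foldl_cons, hstep']

theorem outer_inv (tasks : List Int) (st : Int) :
    ∀ (k : Nat), k ≤ 2 ^ tasks.length - 1 →
      (((List.range' 1 k).foldl
          (fun dp s => (List.range tasks.length).foldl (innerA tasks st s) dp)
          (dpInit tasks tasks.length)).length = 2 ^ tasks.length ∧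
       ∀ t, t < 2 ^ tasks.length →
        ((List.range' 1 k).foldl
          (fun dp s => (List.range tasks.length).foldl (innerA tasks st s) dp)
          (dpInit tasks tasks.length)).getD t (0, 0) =
          if t ≤ k then Fspec tasks st tasks.length t else ((tasks.length : Int), 0)) := by
  intro k
  induction k with
  | zero =>
    intro _
    constructor
    · simp [dpInit]
    · intro t ht
      simp only [List.range'_zero, List.foldl_nil, dpInit]
      by_cases h0 : t = 0
      · subst h0
        rw [getD_set_self (by simp)]
        rw [if_pos (Nat.le_refl 0), Fspec_eq, if_pos rfl]
      · rw [getD_set_ne (fun h => h0 h.symm), if_neg (by omega)]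
        rw [List.getD_eq_getElem?_getD, List.getElem?_replicate, if_pos ht, Option.getD_some]
  | succ k ihk =>
    intro hk1
    obtain ⟨hlen, hval⟩ := ihk (le_trans (Nat.le_succ k) hk1)
    set dpk := (List.range' 1 k).foldl
        (fun dp s => (List.range tasks.length).foldl (innerA tasks st s) dp)
        (dpInit tasks tasks.length) with hdpk
    have hsplit : (List.range' 1 (k + 1)).foldl
        (fun dp s => (List.range tasks.length).foldl (innerA tasks st s) dp)
        (dpInit tasks tasks.length)
        = (List.range tasks.length).foldl (innerA tasks st (k + 1)) dpk := by
      rw [List.range'_concat, List.foldl_append, List.foldl_cons, List.foldl_nil, ← hdpk]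
      norm_num
      rw [Nat.add_comm 1 k]
    have hs : k + 1 < dpk.length := by rw [hlen]; omega
    have hinner := inner_fold tasks st (k + 1) (List.range tasks.length) dpk hs
    have hinit : dpk.getD (k + 1) (0, 0) = ((tasks.length : Int), 0) := by
      rw [hval (k + 1) (by omega), if_neg (by omega)]
    have hcongr : pstep tasks st dpk (k + 1) = fstep tasks st tasks.length (k + 1) := by
      funext acc i
      unfold pstep fstep
      by_cases hb : (k + 1) &&& (1 <<< i) ≠ 0
      · rw [if_pos hb, dif_pos hb]
        have hlt : (k + 1) ^^^ (1 <<< i) < k + 1 := pv_xor_lt hb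
        rw [hval ((k + 1) ^^^ (1 <<< i)) (by omega), if_pos (by omega)]
      · rw [if_neg hb, dif_neg hb]
    have hfold : (List.range tasks.length).foldl (pstep tasks st dpk (k + 1))
        (dpk.getD (k + 1) (0, 0)) = Fspec tasks st tasks.length (k + 1) := by
      rw [hinit, hcongr, Fspec_eq, if_neg (by omega)]
    constructor
    · rw [hsplit, hinner]
      simp [hlen]
    · intro t ht
      rw [hsplit, hinner, hfold]
      by_cases hts : t = k + 1
      · subst hts
        rw [getD_set_self hs, if_pos (Nat.le_refl _)]
      · rw [getD_set_ne (fun h => hts h.symm), hval t ht]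
        by_cases htk : t ≤ k
        · rw [if_pos htk, if_pos (by omega)]
        · rw [if_neg htk, if_neg (by omega)]

theorem memoInv_set (tasks : List Int) (st : Int) (n : Nat) (memo : Array (Option (Int × Int)))
    (mask : Nat) (v : Int × Int) (hinv : MemoInv tasks st n memo)
    (hv : v = Fspec tasks st n mask) :
    MemoInv tasks st n (memo.setIfInBounds mask (some v)) := by
  intro k w hk
  rw [Array.getD_eq_getD_getElem?, Array.getElem?_setIfInBounds] at hk
  by_cases hij : mask = k
  · rw [if_pos hij] at hk
    by_cases hsz : mask < memo.size
    · rw [if_pos hsz, Option.getD_some] at hk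
      injection hk with hvw
      rw [← hvw, hv, hij]
    · rw [if_neg hsz] at hk
      simp at hk
  · rw [if_neg hij] at hk
    exact hinv k w (by rw [Array.getD_eq_getD_getElem?]; exact hk)

theorem goB_fold (tasks : List Int) (st : Int) (n mask : Nat)
    (IH : ∀ m, m < mask → ∀ memo, MemoInv tasks st n memo →
      (goB tasks st n m memo).1 = Fspec tasks st n m ∧ MemoInv tasks st n (goB tasks st n m memo).2) :
    ∀ (l : List Nat) (acc : Int × Int) (memo : Array (Option (Int × Int))),
      MemoInv tasks st n memo →
      (l.foldl (bstep tasks st n mask) (acc, memo)).1 = l.foldl (fstep tasks st n mask) acc ∧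
      MemoInv tasks st n (l.foldl (bstep tasks st n mask) (acc, memo)).2 := by
  intro l
  induction l with
  | nil => intro acc memo h; exact ⟨rfl, h⟩
  | cons i l ih =>
    intro acc memo h
    rw [List.foldl_cons, List.foldl_cons]
    by_cases hb : mask &&& (1 <<< i) ≠ 0
    · have hI := IH (mask ^^^ (1 <<< i)) (pv_xor_lt hb) memo h
      have hb1 : bstep tasks st n mask (acc, memo) i =
          (fstep tasks st n mask acc i, (goB tasks st n (mask ^^^ (1 <<< i)) memo).2) := by
        simp only [bstep, fstep, dif_pos hb]
        rw [hI.1]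
      rw [hb1]
      exact ih _ _ hI.2
    · have hb1 : bstep tasks st n mask (acc, memo) i = (acc, memo) := by
        simp only [bstep, dif_neg hb]
      have hb2 : fstep tasks st n mask acc i = acc := by
        simp only [fstep, dif_neg hb]
      rw [hb1, hb2]
      exact ih _ _ h

theorem goB_correct (tasks : List Int) (st : Int) (n : Nat) :
    ∀ (mask : Nat) (memo : Array (Option (Int × Int))), MemoInv tasks st n memo →
      (goB tasks st n mask memo).1 = Fspec tasks st n mask ∧
      MemoInv tasks st n (goB tasks st n mask memo).2 := by
  intro mask
  induction mask using Nat.strong_induction_on with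
  | _ mask IH =>
    intro memo hinv
    rcases hm : memo.getD mask none with _ | v
    · by_cases h0 : mask = 0
      · subst h0
        simp only [goB_eq, hm]
        have hF : ((1 : Int), (0 : Int)) = Fspec tasks st n 0 := by
          rw [Fspec_eq, if_pos rfl]
        exact ⟨hF, memoInv_set tasks st n memo 0 _ hinv hF⟩
      · simp only [goB_eq, hm, if_neg h0]
        have hf := goB_fold tasks st n mask IH (List.range n) ((n : Int), (0 : Int)) memo hinv
        have h1 : ((List.range n).foldl (bstep tasks st n mask) (((n : Int), (0 : Int)), memo)).1
            = Fspec tasks st n mask := by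
          rw [hf.1, Fspec_eq, if_neg h0]
        exact ⟨h1, memoInv_set tasks st n _ mask _ hf.2 h1⟩
    · simp only [goB_eq, hm]
      exact ⟨hinv mask v hm, hinv⟩

-- ===== VERDICT (by name: the statement is the Claim_ definition above) =====
theorem minSessions_spec : Claim_equal_minSessions := by
  intro tasks st _
  unfold Spec_minSessions
  rw [minSessions_eq, minSessions_alt_eq]
  have hpos : 0 < 2 ^ tasks.length := Nat.two_pow_pos _
  have hm : 2 ^ tasks.length - 1 < 2 ^ tasks.length := Nat.sub_lt hpos (by norm_num)
  obtain ⟨hlen, hval⟩ := outer_inv tasks st (2 ^ tasks.length - 1) (le_refl _)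
  rw [hval _ hm, if_pos (le_refl _)]
  have hinv0 : MemoInv tasks st tasks.length (Array.replicate (2 ^ tasks.length) none) := by
    intro k v hk
    exfalso
    rw [Array.getD_eq_getD_getElem?, Array.getElem?_replicate] at hk
    by_cases hlt : k < 2 ^ tasks.length <;> simp [hlt] at hk
  rw [(goB_correct tasks st tasks.length (2 ^ tasks.length - 1) _ hinv0).1]
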